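-- pv_equiv track=rewrite | github.com/mirmik/termin | termin/navmesh/region_growing.py | are_connected_26
-- ===== SOURCE A (Python) =====
-- NEIGHBORS_26 = [
--     (dx, dy, dz)
--     for dx in (-1, 0, 1)
--     for dy in (-1, 0, 1)
--     for dz in (-1, 0, 1)
--     if (dx, dy, dz) != (0, 0, 0)
-- ]
--
-- def are_connected_26(voxels: list[tuple[int, int, int]]) -> bool:
--     """
--     Проверить, связаны ли все воксели между собой по 26-связности.
--     """
--     if len(voxels) <= 1:
--         return True
--
--     voxel_set = set(voxels)
--     visited: set[tuple[int, int, int]] = set()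
--     queue = [voxels[0]]
--     visited.add(voxels[0])
--
--     while queue:
--         current = queue.pop()
--         vx, vy, vz = current
--         for dx, dy, dz in NEIGHBORS_26:
--             neighbor = (vx + dx, vy + dy, vz + dz)
--             if neighbor in voxel_set and neighbor not in visited:
--                 visited.add(neighbor)
--                 queue.append(neighbor)
--
--     return len(visited) == len(voxels)
-- ===== SOURCE B (Python) =====
-- def are_connected_26(voxels):
--     if len(voxels) <= 1:
--         return True
--     s = set(voxels)
--     comp = {voxels[0]}
--     for _ in range(len(s)):
--         grown = {v for v in s
--                  if v not in comp
--                  and any(max(abs(v[0] - c[0]), abs(v[1] - c[1]), abs(v[2] - c[2])) <= 1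
--                          for c in comp)}
--         if not grown:
--             break
--         comp |= grown
--     return len(comp) == len(voxels)
-- ===== Notes on version B (the rewrite author's own statement) =====
-- stated objective: alternative
-- what changed: Replaces A's stack-based DFS over the explicit 26 neighbour-offset list (visited set + queue) by round-based fixpoint saturation: each round adds every unreached voxel within Chebyshev distance 1 of the current component and stops when nothing grows.
import Mathlib
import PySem

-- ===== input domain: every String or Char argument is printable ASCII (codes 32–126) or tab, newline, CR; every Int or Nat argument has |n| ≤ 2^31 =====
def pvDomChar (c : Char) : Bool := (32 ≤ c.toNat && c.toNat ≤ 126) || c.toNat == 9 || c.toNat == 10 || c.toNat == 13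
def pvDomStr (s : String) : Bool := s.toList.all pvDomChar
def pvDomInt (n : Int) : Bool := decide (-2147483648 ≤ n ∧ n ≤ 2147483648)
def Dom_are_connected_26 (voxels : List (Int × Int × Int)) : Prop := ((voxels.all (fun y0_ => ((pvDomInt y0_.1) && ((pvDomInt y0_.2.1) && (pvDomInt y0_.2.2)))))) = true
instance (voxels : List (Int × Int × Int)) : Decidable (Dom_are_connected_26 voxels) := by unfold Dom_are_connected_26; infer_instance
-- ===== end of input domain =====

-- B replaces A's stack-based DFS over the 26 explicit neighbour offsets by round-based
-- fixpoint saturation of the component using a Chebyshev-distance predicate (objective: alternative).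

-- ===== PORT A =====
-- NEIGHBORS_26, transcribed as the same triple comprehension
def pvNbrs : List (Int × Int × Int) :=
  (([-1, 0, 1] : List Int).flatMap fun dx =>
    (([-1, 0, 1] : List Int).flatMap fun dy =>
      (([-1, 0, 1] : List Int).map fun dz => (dx, dy, dz)))).filter
    (fun d => d ≠ ((0, 0, 0) : Int × Int × Int))

-- neighbor = (vx + dx, vy + dy, vz + dz)
def pvAdd (c d : Int × Int × Int) : Int × Int × Int :=
  (c.1 + d.1, c.2.1 + d.2.1, c.2.2 + d.2.2)

-- the body of one 'for dx, dy, dz in NEIGHBORS_26' pass: state = (visited, queue)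
def pvDfsBody (s : List (Int × Int × Int)) (current : Int × Int × Int)
    (st : PySem.Set (Int × Int × Int) × List (Int × Int × Int)) (d : Int × Int × Int) :
    PySem.Set (Int × Int × Int) × List (Int × Int × Int) :=
  let n := pvAdd current d
  if n ∈ s ∧ n ∉ st.1 then (PySem.Set.add st.1 n, st.2 ++ [n]) else st

-- the 'while queue:' loop; fuel only makes it total (it is always sufficient, see pvDfs_main)
def pvDfsLoop : Nat → List (Int × Int × Int) → PySem.Set (Int × Int × Int) →
    List (Int × Int × Int) → PySem.Set (Int × Int × Int)
  | 0, _, visited, _ => visited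
  | fuel + 1, s, visited, queue =>
    match PySem.List.pop? queue with
    | none => visited
    | some (current, queue') =>
      let st := pvNbrs.foldl (pvDfsBody s current) (visited, queue')
      pvDfsLoop fuel s st.1 st.2

def are_connected_26 (voxels : List (Int × Int × Int)) : Bool :=
  if voxels.length ≤ 1 then true
  else
    match voxels with
    | [] => true  -- unreachable: length ≥ 2
    | v0 :: _ =>
      let voxel_set := PySem.Set.ofList voxels
      let visited := PySem.Set.add PySem.Set.empty v0
      let result := pvDfsLoop (27 * voxel_set.length + 1) voxel_set visited [v0]
      result.length == voxels.length

-- ===== PORT B =====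
-- max(abs(v0-c0), abs(v1-c1), abs(v2-c2)) <= 1
def pvAdjB (c v : Int × Int × Int) : Bool :=
  max (v.1 - c.1).natAbs (max (v.2.1 - c.2.1).natAbs (v.2.2 - c.2.2).natAbs) ≤ 1

-- grown = {v for v in s if v not in comp and any(... for c in comp)}
def pvGrown (s comp : List (Int × Int × Int)) : List (Int × Int × Int) :=
  s.filter (fun v => decide (v ∉ comp) && comp.any (fun c => pvAdjB c v))

-- the bounded 'for _ in range(len(s))' saturation loop with its break
def pvSatLoop : Nat → List (Int × Int × Int) → PySem.Set (Int × Int × Int) →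
    PySem.Set (Int × Int × Int)
  | 0, _, comp => comp
  | k + 1, s, comp =>
    let grown := pvGrown s comp
    if grown = [] then comp else pvSatLoop k s (PySem.Set.update comp grown)

def are_connected_26_alt (voxels : List (Int × Int × Int)) : Bool :=
  if voxels.length ≤ 1 then true
  else
    match voxels with
    | [] => true  -- unreachable: length ≥ 2
    | v0 :: _ =>
      let s := PySem.Set.ofList voxels
      let comp := pvSatLoop s.length s (PySem.Set.add PySem.Set.empty v0)
      comp.length == voxels.length

-- ===== PRECONDITION & SPEC =====
def Spec_are_connected_26 (voxels : List (Int × Int × Int)) (out : Bool) : Prop := out = are_connected_26_alt voxels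
instance (voxels : List (Int × Int × Int)) (out : Bool) : Decidable (Spec_are_connected_26 voxels out) := by unfold Spec_are_connected_26; infer_instance

-- ===== CLAIM (what is proved, stated in full; the proofs are below) =====
def Claim_equal_are_connected_26 : Prop := ∀ (voxels : List (Int × Int × Int)), Dom_are_connected_26 voxels → Spec_are_connected_26 voxels (are_connected_26 voxels)

-- ===== LEMMAS AND PROOFS =====
lemma pvAdjB_add (c : Int × Int × Int) {d : Int × Int × Int} (hd : d ∈ pvNbrs) :
    pvAdjB c (pvAdd c d) = true := by
  fin_cases hd <;> simp [pvAdjB, pvAdd]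

lemma pvMem_nbrs_of_adjB {c v : Int × Int × Int} (h : pvAdjB c v = true) (hne : v ≠ c) :
    ∃ d ∈ pvNbrs, v = pvAdd c d := by
  obtain ⟨a, b, e⟩ := c
  obtain ⟨x, y, z⟩ := v
  refine ⟨(x - a, y - b, z - e), ?_, by simp [pvAdd]⟩
  simp only [pvAdjB, decide_eq_true_eq, Nat.max_le] at h
  have h1 : -1 ≤ x - a ∧ x - a ≤ 1 := by omega
  have h2 : -1 ≤ y - b ∧ y - b ≤ 1 := by omega
  have h3 : -1 ≤ z - e ∧ z - e ≤ 1 := by omega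
  have hne' : ¬(x - a = 0 ∧ y - b = 0 ∧ z - e = 0) := by
    rintro ⟨r1, r2, r3⟩; exact hne (by simp [Prod.ext_iff]; omega)
  simp only [pvNbrs, List.mem_filter, List.mem_flatMap, List.mem_map]
  refine ⟨⟨x - a, by simp; omega, y - b, by simp; omega, z - e, by simp; omega, rfl⟩, ?_⟩
  simp [Prod.ext_iff]
  omega

lemma pvDfsFold (s : List (Int × Int × Int)) (current : Int × Int × Int)
    (ds : List (Int × Int × Int)) :
    ∀ vis q, vis.Nodup →
      ∃ new, ds.foldl (pvDfsBody s current) (vis, q) = (vis ++ new, q ++ new) ∧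
        (vis ++ new).Nodup ∧
        (∀ n ∈ new, n ∈ s ∧ ∃ d ∈ ds, n = pvAdd current d) ∧
        (∀ d ∈ ds, pvAdd current d ∈ s → pvAdd current d ∈ vis ++ new) := by
  induction ds with
  | nil => intro vis q h; exact ⟨[], by simp, by simpa, by simp, by simp⟩
  | cons d ds ih =>
    intro vis q hnd
    by_cases hc : pvAdd current d ∈ s ∧ pvAdd current d ∉ vis
    · have hstep : pvDfsBody s current (vis, q) d =
          (vis ++ [pvAdd current d], q ++ [pvAdd current d]) := by
        simp [pvDfsBody, hc]
      have hnd' : (vis ++ [pvAdd current d]).Nodup := by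
        simp only [List.nodup_append, List.nodup_singleton, true_and]
        refine ⟨hnd, ?_⟩
        intro x hx y hy
        rw [List.mem_singleton] at hy
        subst hy
        exact fun heq => hc.2 (heq ▸ hx)
      obtain ⟨new, heq, hn2, hn3, hn4⟩ := ih (vis ++ [pvAdd current d]) (q ++ [pvAdd current d]) hnd'
      refine ⟨pvAdd current d :: new, ?_, ?_, ?_, ?_⟩
      · simpa [hstep, List.append_assoc] using heq
      · simpa [List.append_assoc] using hn2
      · intro n hn
        rcases List.mem_cons.mp hn with rfl | hn
        · exact ⟨hc.1, d, by simp⟩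
        · obtain ⟨h1, d', hd', h2⟩ := hn3 n hn
          exact ⟨h1, d', by simp [hd'], h2⟩
      · intro d' hd' hin
        rcases List.mem_cons.mp hd' with rfl | hd'
        · simp
        · have := hn4 d' hd' hin
          simpa [List.append_assoc] using this
    · have hstep : pvDfsBody s current (vis, q) d = (vis, q) := by
        simp only [pvDfsBody]
        rw [if_neg hc]
      obtain ⟨new, heq, hn2, hn3, hn4⟩ := ih vis q hnd
      refine ⟨new, by simpa [hstep] using heq, hn2, ?_, ?_⟩
      · intro n hn
        obtain ⟨h1, d', hd', h2⟩ := hn3 n hn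
        exact ⟨h1, d', by simp [hd'], h2⟩
      · intro d' hd' hin
        rcases List.mem_cons.mp hd' with rfl | hd'
        · have hmem : pvAdd current d' ∈ vis := by
            by_contra hvv; exact hc ⟨hin, hvv⟩
          exact List.mem_append_left _ hmem
        · exact hn4 d' hd' hin

lemma pvDfs_main (s : List (Int × Int × Int))
    (C : Int × Int × Int → Prop)
    (hC : ∀ x, C x → ∀ d ∈ pvNbrs, pvAdd x d ∈ s → C (pvAdd x d)) :
    ∀ fuel vis queue, vis.Nodup → vis ⊆ s → queue ⊆ vis →
      (∀ x ∈ vis, x ∉ queue → ∀ d ∈ pvNbrs, pvAdd x d ∈ s → pvAdd x d ∈ vis) →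
      (∀ x ∈ vis, C x) →
      27 * (s.length - vis.length) + queue.length < fuel →
      vis ⊆ pvDfsLoop fuel s vis queue ∧ (pvDfsLoop fuel s vis queue).Nodup ∧
        pvDfsLoop fuel s vis queue ⊆ s ∧
        (∀ x ∈ pvDfsLoop fuel s vis queue, ∀ d ∈ pvNbrs, pvAdd x d ∈ s →
            pvAdd x d ∈ pvDfsLoop fuel s vis queue) ∧
        (∀ x ∈ pvDfsLoop fuel s vis queue, C x) := by
  intro fuel
  induction fuel with
  | zero => intro vis queue _ _ _ _ _ hlt; omega
  | succ fuel ih =>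
    intro vis queue hnd hsub hqv hfront hCvis hfuel
    rcases List.eq_nil_or_concat queue with rfl | ⟨q', current, rfl⟩
    · -- queue empty: loop returns vis
      have hres : pvDfsLoop (fuel + 1) s vis [] = vis := by
        simp [pvDfsLoop, PySem.List.pop?]
      rw [hres]
      exact ⟨List.Subset.refl _, hnd, hsub,
        fun x hx d hd hin => hfront x hx (by simp) d hd hin, hCvis⟩
    · -- pop the last element
      rw [List.concat_eq_append] at hqv hfront hfuel ⊢
      have hres : pvDfsLoop (fuel + 1) s vis (q' ++ [current]) =
          pvDfsLoop fuel s ((pvNbrs.foldl (pvDfsBody s current) (vis, q')).1)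
            ((pvNbrs.foldl (pvDfsBody s current) (vis, q')).2) := by
        simp [pvDfsLoop, PySem.List.pop?_last]
      obtain ⟨new, heq, hnd', hnew, hcov⟩ := pvDfsFold s current pvNbrs vis q' hnd
      have hcur_vis : current ∈ vis := hqv (by simp)
      have hsub' : vis ++ new ⊆ s := by
        intro x hx
        rcases List.mem_append.mp hx with hx | hx
        · exact hsub hx
        · exact (hnew x hx).1
      have hC' : ∀ x ∈ vis ++ new, C x := by
        intro x hx
        rcases List.mem_append.mp hx with hx | hx
        · exact hCvis x hx
        · obtain ⟨hxs, d, hd, rfl⟩ := hnew x hx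
          exact hC current (hCvis current hcur_vis) d hd hxs
      have hqv' : q' ++ new ⊆ vis ++ new := by
        intro x hx
        rcases List.mem_append.mp hx with hx | hx
        · exact List.mem_append_left _ (hqv (List.mem_append_left _ hx))
        · exact List.mem_append_right _ hx
      have hfront' : ∀ x ∈ vis ++ new, x ∉ q' ++ new →
          ∀ d ∈ pvNbrs, pvAdd x d ∈ s → pvAdd x d ∈ vis ++ new := by
        intro x hx hxq d hd hds
        rcases List.mem_append.mp hx with hx | hx
        · by_cases hxc : x = current
          · subst hxc; exact hcov d hd hds
          · have hxq0 : x ∉ q' ++ [current] := by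
              intro hmem
              rcases List.mem_append.mp hmem with h | h
              · exact hxq (List.mem_append_left _ h)
              · exact hxc (List.mem_singleton.mp h)
            exact List.mem_append_left _ (hfront x hx hxq0 d hd hds)
        · exact absurd (List.mem_append_right q' hx) hxq
      have hlen : (vis ++ new).length ≤ s.length := (hnd'.subperm hsub').length_le
      have hfuel' : 27 * (s.length - (vis ++ new).length) + (q' ++ new).length < fuel := by
        simp only [List.length_append, List.length_cons, List.length_nil] at *
        omega
      have := ih (vis ++ new) (q' ++ new) hnd' hsub' hqv' hfront' hC' hfuel'
      rw [hres, heq]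
      exact ⟨fun x hx => this.1 (List.mem_append_left _ hx), this.2⟩

lemma pvUpdate_append (comp grown : List (Int × Int × Int)) (hnd : grown.Nodup)
    (h : ∀ x ∈ grown, x ∉ comp) :
    PySem.Set.update comp grown = comp ++ grown := by
  induction grown generalizing comp with
  | nil => simp [PySem.Set.update]
  | cons g gs ih =>
    have h1 : PySem.Set.update comp (g :: gs) = PySem.Set.update (comp ++ [g]) gs := by
      simp [PySem.Set.update, PySem.Set.add_of_not_mem (h g (by simp))]
    rw [h1, ih (comp ++ [g]) (List.Nodup.of_cons hnd)]
    · simp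
    · intro x hx hmem
      rcases List.mem_append.mp hmem with hm | hm
      · exact h x (by simp [hx]) hm
      · rw [List.mem_singleton] at hm
        subst hm
        exact (List.nodup_cons.mp hnd).1 hx

lemma pvSat_main (s : List (Int × Int × Int)) (hs : s.Nodup)
    (C : Int × Int × Int → Prop)
    (hC : ∀ c v, C c → v ∈ s → pvAdjB c v = true → C v) :
    ∀ k comp, comp.Nodup → comp ⊆ s → (∀ x ∈ comp, C x) →
      s.length ≤ k + comp.length →
      comp ⊆ pvSatLoop k s comp ∧ (pvSatLoop k s comp).Nodup ∧
        pvSatLoop k s comp ⊆ s ∧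
        (∀ v ∈ s, (∃ c ∈ pvSatLoop k s comp, pvAdjB c v = true) → v ∈ pvSatLoop k s comp) ∧
        (∀ x ∈ pvSatLoop k s comp, C x) := by
  intro k
  induction k with
  | zero =>
    intro comp hnd hsub hCc hk
    have hperm : comp.Perm s :=
      List.Subperm.perm_of_length_le (hnd.subperm hsub) (by omega)
    have hseq : ∀ v ∈ s, v ∈ comp := fun v hv => hperm.symm.subset hv
    simp only [pvSatLoop]
    exact ⟨List.Subset.refl _, hnd, hsub, fun v hv _ => hseq v hv, hCc⟩
  | succ k ih =>
    intro comp hnd hsub hCc hk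
    by_cases hg : pvGrown s comp = []
    · have hres : pvSatLoop (k + 1) s comp = comp := by
        simp [pvSatLoop, hg]
      rw [hres]
      refine ⟨List.Subset.refl _, hnd, hsub, ?_, hCc⟩
      intro v hv ⟨c, hc, hadj⟩
      by_contra hvc
      have : v ∈ pvGrown s comp := by
        simp only [pvGrown, List.mem_filter]
        exact ⟨hv, by simp only [Bool.and_eq_true, decide_eq_true_eq, List.any_eq_true]
                      exact ⟨hvc, c, hc, hadj⟩⟩
      rw [hg] at this
      exact absurd this (List.not_mem_nil)
    · have hgn : ∀ x ∈ pvGrown s comp, x ∈ s ∧ x ∉ comp ∧ ∃ c ∈ comp, pvAdjB c x = true := by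
        intro x hx
        simp only [pvGrown, List.mem_filter, Bool.and_eq_true, decide_eq_true_eq,
          List.any_eq_true] at hx
        exact ⟨hx.1, hx.2.1, hx.2.2⟩
      have hgnd : (pvGrown s comp).Nodup := List.Nodup.filter _ hs
      have hupd : PySem.Set.update comp (pvGrown s comp) = comp ++ pvGrown s comp :=
        pvUpdate_append comp (pvGrown s comp) hgnd (fun x hx => (hgn x hx).2.1)
      have hres : pvSatLoop (k + 1) s comp = pvSatLoop k s (comp ++ pvGrown s comp) := by
        simp only [pvSatLoop]
        rw [if_neg hg, hupd]
      have hnd' : (comp ++ pvGrown s comp).Nodup := by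
        rw [List.nodup_append]
        refine ⟨hnd, hgnd, ?_⟩
        intro x hx y hy heq
        exact (hgn y hy).2.1 (heq ▸ hx)
      have hsub' : comp ++ pvGrown s comp ⊆ s := by
        intro x hx
        rcases List.mem_append.mp hx with hx | hx
        · exact hsub hx
        · exact (hgn x hx).1
      have hC' : ∀ x ∈ comp ++ pvGrown s comp, C x := by
        intro x hx
        rcases List.mem_append.mp hx with hx | hx
        · exact hCc x hx
        · obtain ⟨hxs, hxc, c, hc, hadj⟩ := hgn x hx
          exact hC c x (hCc c hc) hxs hadj
      have hglen : 1 ≤ (pvGrown s comp).length := List.length_pos_of_ne_nil hg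
      have hk' : s.length ≤ k + (comp ++ pvGrown s comp).length := by
        simp only [List.length_append]
        omega
      have := ih (comp ++ pvGrown s comp) hnd' hsub' hC' hk'
      rw [hres]
      exact ⟨fun x hx => this.1 (List.mem_append_left _ hx), this.2⟩

lemma are_connected_26_spec' : ∀ (voxels : List (Int × Int × Int)),
    are_connected_26 voxels = are_connected_26_alt voxels := by
  intro voxels
  by_cases hlen : voxels.length ≤ 1
  · simp [are_connected_26, are_connected_26_alt, hlen]
  · rcases voxels with _ | ⟨v0, rest⟩
    · simp at hlen
    · set S := PySem.Set.ofList (v0 :: rest) with hS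
      have hsnd : S.Nodup := PySem.Set.nodup_ofList _
      have hv0S : v0 ∈ S := (PySem.Set.mem_ofList _ _).mpr (List.mem_cons_self)
      have hSpos : 1 ≤ S.length := List.length_pos_of_mem hv0S
      have hvis0 : PySem.Set.add PySem.Set.empty v0 = [v0] := rfl
      set Rdfs := pvDfsLoop (27 * S.length + 1) S [v0] [v0] with hRdfs
      set Rsat := pvSatLoop S.length S [v0] with hRsat
      have hfront0 : ∀ x ∈ [v0], x ∉ [v0] →
          ∀ d ∈ pvNbrs, pvAdd x d ∈ S → pvAdd x d ∈ [v0] := by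
        intro x hx hxq; exact absurd hx hxq
      have hfuel0 : 27 * (S.length - 1) + 1 < 27 * S.length + 1 := by omega
      have hsub0 : [v0] ⊆ S := by intro x hx; rw [List.mem_singleton] at hx; exact hx ▸ hv0S
      have h1 := pvDfs_main S (fun _ => True) (fun _ _ _ _ _ => trivial)
        (27 * S.length + 1) [v0] [v0] (List.nodup_singleton _) hsub0
        (List.Subset.refl _) hfront0 (fun _ _ => trivial)
        (by simpa using hfuel0)
      obtain ⟨hd_sub0, hd_nd, hd_sub, hd_closed, -⟩ := h1
      have hC2 : ∀ c v, c ∈ Rdfs → v ∈ S → pvAdjB c v = true → v ∈ Rdfs := by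
        intro c v hc hv hadj
        by_cases hvc : v = c
        · exact hvc ▸ hc
        · obtain ⟨d, hd, rfl⟩ := pvMem_nbrs_of_adjB hadj hvc
          exact hd_closed c hc d hd hv
      have h2 := pvSat_main S hsnd (· ∈ Rdfs) hC2 S.length [v0]
        (List.nodup_singleton _) hsub0
        (fun x hx => hd_sub0 hx) (by omega)
      obtain ⟨hs_sub0, hs_nd, hs_sub, hs_closed, hs_in_dfs⟩ := h2
      have hC3 : ∀ x, x ∈ Rsat → ∀ d ∈ pvNbrs, pvAdd x d ∈ S → pvAdd x d ∈ Rsat := by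
        intro x hx d hd hds
        exact hs_closed (pvAdd x d) hds ⟨x, hx, pvAdjB_add x hd⟩
      have h3 := pvDfs_main S (· ∈ Rsat) hC3
        (27 * S.length + 1) [v0] [v0] (List.nodup_singleton _) hsub0
        (List.Subset.refl _) hfront0 (fun x hx => hs_sub0 hx)
        (by simpa using hfuel0)
      have hdfs_in_sat : ∀ x ∈ Rdfs, x ∈ Rsat := h3.2.2.2.2
      have hlen_eq : Rdfs.length = Rsat.length :=
        Nat.le_antisymm ((hd_nd.subperm hdfs_in_sat).length_le)
          ((hs_nd.subperm hs_in_dfs).length_le)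
      show are_connected_26 (v0 :: rest) = are_connected_26_alt (v0 :: rest)
      rw [are_connected_26, are_connected_26_alt, if_neg hlen, if_neg hlen]
      simp only [hvis0, ← hS, ← hRdfs, ← hRsat, hlen_eq]

-- ===== VERDICT (by name: the statement is the Claim_ definition above) =====
theorem are_connected_26_spec : Claim_equal_are_connected_26 := by
  intro voxels _
  exact are_connected_26_spec' voxels
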